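-- pv_equiv track=rewrite | github.com/emorskeemor/obg-v1 | blocks/core/evaluation.py | get_subject_count
-- ===== SOURCE A (Python) =====
-- def get_subject_count(data, options):
--     subjects = dict.fromkeys(options, 0)
--     for options in data:
--         for subject in options:
--             if subject:
--                 count = subjects.get(subject, None)
--                 if count is not None:
--                     count += 1
--                 subjects.update({subject:count})
--     return {k:v for k, v in sorted(subjects.items(), key=lambda x:x[1], reverse=True)}
-- ===== SOURCE B (Python) =====
-- def get_subject_count(data, options):
--     # Per-option counting: flatten once, then count each deduplicated option
--     # directly in the flat list (no tally dict, no conditional increments).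
--     flat = [s for row in data for s in row]
--     pairs = [(k, flat.count(k) if k else 0) for k in dict.fromkeys(options)]
--     pairs.sort(key=lambda x: x[1], reverse=True)
--     return dict(pairs)
-- ===== Notes on version B (the rewrite author's own statement) =====
-- stated objective: alternative
-- what changed: B keeps no running tally at all: it flattens data once and, for each deduplicated option, counts that option's occurrences directly in the flat list (one independent list.count scan per option in C), then stable-sorts the built pair list descending; A instead seeds a dict with the options and conditionally increments entries in a Python-level inner loop while scanning data.
-- intended difference: On inputs whose only dict key is a truthy subject outside the (hence key-less) options, A returns that stray subject mapped to None instead of a count, while B returns the empty dict, the intended value since the function reports counts of the given options only. — e.g. on get_subject_count([["qq"], ["qq"]], []): A returns [("qq", none)], B returns []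
-- crash fix: On inputs with a truthy subject outside options and at least two distinct keys overall, A raises TypeError (it stored None for the stray subject and Python None is unorderable when sorting), while B returns the counts of the options. — e.g. on get_subject_count([["kj", "kj"]], ["jk", "jk"]): A raises TypeError, B returns [("jk", some 0)]
import Mathlib
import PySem

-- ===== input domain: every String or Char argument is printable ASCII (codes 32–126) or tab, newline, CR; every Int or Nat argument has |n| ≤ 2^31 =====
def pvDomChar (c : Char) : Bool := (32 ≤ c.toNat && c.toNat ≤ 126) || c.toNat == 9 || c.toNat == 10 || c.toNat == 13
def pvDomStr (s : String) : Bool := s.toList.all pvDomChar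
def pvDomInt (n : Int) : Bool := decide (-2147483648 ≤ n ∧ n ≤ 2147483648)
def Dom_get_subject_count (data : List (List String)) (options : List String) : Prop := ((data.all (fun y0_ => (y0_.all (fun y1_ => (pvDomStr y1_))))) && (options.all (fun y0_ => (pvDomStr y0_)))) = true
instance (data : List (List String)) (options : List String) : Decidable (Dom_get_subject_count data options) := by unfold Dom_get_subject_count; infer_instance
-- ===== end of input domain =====

-- B keeps no tally: it flattens data once and counts each deduplicated option directly in
-- the flat list (objective: alternative; not faster). Equivalence is on the return value;
-- neither version mutates its arguments.

-- ===== PORT A =====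
-- A stores Option Int values: a truthy subject not in `options` is stored as `none`
-- (Python None). The sort key `x.2.getD 0` is exact under Pre_ ∧ ¬ D_, where every stored
-- value is `some _` (with a `none` value and ≥ 2 items the Python sort raises TypeError,
-- excluded by Pre_; with one single `none` item — the D_ corner — no comparison happens).
def get_subject_count (data : List (List String)) (options : List String) : List (String × Option Int) :=
  let subjects : PySem.Dict String (Option Int) :=
    options.foldl (fun d k => d.insert k (some 0)) PySem.Dict.empty
  let subjects :=
    data.foldl (fun d row =>
      row.foldl (fun d subject =>
        if subject ≠ "" then
          d.insert subject (Option.map (· + 1) (d.getD subject none))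
        else d) d) subjects
  (PySem.Dict.ofList (PySem.List.sorted subjects.items (fun x => x.2.getD 0) true)).items

-- ===== PORT B =====
def get_subject_count_alt (data : List (List String)) (options : List String) : List (String × Option Int) :=
  let flat := data.flatten
  let pairs : List (String × Option Int) :=
    (PySem.List.dedup options).map
      (fun k => (k, some (if k ≠ "" then (PySem.List.count flat k : Int) else 0)))
  (PySem.Dict.ofList (PySem.List.sorted pairs (fun x => x.2.getD 0) true)).items

-- ===== PRECONDITION & SPEC =====
-- Pre_ excludes exactly the inputs where A raises TypeError: a truthy subject of data missing
-- from options makes A store a Python None, and with at least two dict keys overall the final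
-- sort then compares that None (Python None is unorderable).
def Pre_get_subject_count (data : List (List String)) (options : List String) : Prop :=
  ¬ ((∃ row ∈ data, ∃ s ∈ row, s ≠ "" ∧ s ∉ options) ∧
      2 ≤ (PySem.List.dedup (options ++ data.flatten.filter (fun s => s ≠ ""))).length)
instance (data : List (List String)) (options : List String) : Decidable (Pre_get_subject_count data options) := by unfold Pre_get_subject_count; infer_instance

def pvWitness_get_subject_count : List (List String) × List String :=
  ([["m", "p"], ["m", "", "p"], ["m"]], ["m", "p", "c", "m"])

-- On inputs with a truthy subject outside options and at least two distinct keys overall,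
-- A raises TypeError (None is unorderable) while B returns the counts of the options.
def Raises_get_subject_count (data : List (List String)) (options : List String) : Prop :=
  (∃ row ∈ data, ∃ s ∈ row, s ≠ "" ∧ s ∉ options) ∧
    2 ≤ (PySem.List.dedup (options ++ data.flatten.filter (fun s => s ≠ ""))).length
instance (data : List (List String)) (options : List String) : Decidable (Raises_get_subject_count data options) := by unfold Raises_get_subject_count; infer_instance
def pvRaiseWitness_get_subject_count : List (List String) × List String := ([["kj", "kj"]], ["jk", "jk"])
def pvRaiseWitnessOut_get_subject_count : List (String × Option Int) := [("jk", some 0)]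

-- On inputs whose only dict key is a truthy subject outside the (hence key-less) options, A
-- returns that stray subject mapped to None instead of a count; B returns the empty dict,
-- the intended value: the function reports counts of the given options only.
def D_get_subject_count (data : List (List String)) (options : List String) : Prop :=
  (∃ row ∈ data, ∃ s ∈ row, s ≠ "" ∧ s ∉ options) ∧
    (PySem.List.dedup (options ++ data.flatten.filter (fun s => s ≠ ""))).length ≤ 1
-- (e.g. data = [["ma"]], options = []: A returns [("ma", none)], B returns [])
instance (data : List (List String)) (options : List String) : Decidable (D_get_subject_count data options) := by unfold D_get_subject_count; infer_instance

def Spec_get_subject_count (data : List (List String)) (options : List String) (out : List (String × Option Int)) : Prop := ¬ D_get_subject_count data options → out = get_subject_count_alt data options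
instance (data : List (List String)) (options : List String) (out : List (String × Option Int)) : Decidable (Spec_get_subject_count data options out) := by unfold Spec_get_subject_count; infer_instance

def pvDiffWitness_get_subject_count : List (List String) × List String := ([["qq"], ["qq"]], [])
def pvDiffWitnessOut_get_subject_count : (List (String × Option Int)) × (List (String × Option Int)) :=
  ([("qq", none)], [])

-- ===== CLAIM (what is proved, stated in full; the proofs are below) =====
def Claim_unchanged_get_subject_count : Prop := ∀ (data : List (List String)) (options : List String), Dom_get_subject_count data options → Pre_get_subject_count data options → Spec_get_subject_count data options (get_subject_count data options)

def Claim_changed_get_subject_count : Prop := Dom_get_subject_count (pvDiffWitness_get_subject_count.1) (pvDiffWitness_get_subject_count.2) ∧ Pre_get_subject_count (pvDiffWitness_get_subject_count.1) (pvDiffWitness_get_subject_count.2) ∧ D_get_subject_count (pvDiffWitness_get_subject_count.1) (pvDiffWitness_get_subject_count.2) ∧ get_subject_count (pvDiffWitness_get_subject_count.1) (pvDiffWitness_get_subject_count.2) = pvDiffWitnessOut_get_subject_count.1 ∧ get_subject_count_alt (pvDiffWitness_get_subject_count.1) (pvDiffWitness_get_subject_count.2) = pvDiffWitnessOut_get_subject_count.2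 ∧ pvDiffWitnessOut_get_subject_count.1 ≠ pvDiffWitnessOut_get_subject_count.2

def Claim_exact_get_subject_count : Prop := ∀ (data : List (List String)) (options : List String), Dom_get_subject_count data options → Pre_get_subject_count data options → D_get_subject_count data options → get_subject_count data options ≠ get_subject_count_alt data options

def Claim_raises_get_subject_count : Prop := (∀ (data : List (List String)) (options : List String), Dom_get_subject_count data options → Raises_get_subject_count data options → ¬ Pre_get_subject_count data options) ∧ (Dom_get_subject_count (pvRaiseWitness_get_subject_count.1) (pvRaiseWitness_get_subject_count.2) ∧ Raises_get_subject_count (pvRaiseWitness_get_subject_count.1) (pvRaiseWitness_get_subject_count.2) ∧ get_subject_count_alt (pvRaiseWitness_get_subject_count.1) (pvRaiseWitness_get_subject_count.2) = pvRaiseWitnessOut_get_subject_count)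

-- ===== LEMMAS AND PROOFS =====

-- a loop that skips empty strings is the same loop over the filtered list
theorem foldl_skip_empty {δ : Type} (f : δ → String → δ) (l : List String) (d : δ) :
    l.foldl (fun d s => if s ≠ "" then f d s else d) d
      = (l.filter (fun s => s ≠ "")).foldl f d := by
  induction l generalizing d with
  | nil => rfl
  | cons x l ih =>
      simp only [List.foldl_cons, List.filter_cons]
      by_cases hx : x = ""
      · rw [if_neg (by simp [hx]), if_neg (by simp [hx])]
        exact ih d
      · rw [if_pos hx, if_pos (by simpa using hx), List.foldl_cons]
        exact ih (f d x)

-- the nested row loop is the loop over the truthy subjects of the flattened data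
theorem nested_loop_eq {δ : Type} (f : δ → String → δ) (data : List (List String)) (d : δ) :
    data.foldl (fun d row => row.foldl (fun d s => if s ≠ "" then f d s else d) d) d
      = (data.flatten.filter (fun s => s ≠ "")).foldl f d := by
  induction data generalizing d with
  | nil => rfl
  | cons row rest ih =>
      simp only [List.foldl_cons, List.flatten_cons, List.filter_append, List.foldl_append]
      rw [foldl_skip_empty, ih]

-- dict.fromkeys(options, 0): every lookup with default (some 0) yields some 0
theorem fromkeys_getD (l : List String) (d : PySem.Dict String (Option Int))
    (hd : ∀ x, d.getD x (some 0) = some 0) (x : String) :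
    (l.foldl (fun d k => d.insert k (some 0)) d).getD x (some 0) = some 0 := by
  induction l generalizing d with
  | nil => exact hd x
  | cons k l ih =>
      refine ih _ (fun y => ?_)
      rw [PySem.Dict.getD_insert]
      split <;> simp [hd]

-- dict.fromkeys(options, 0) as an items list
theorem fromkeys_items (options : List String) :
    (options.foldl (fun d k => d.insert k (some (0 : Int))) PySem.Dict.empty).items
      = (PySem.List.dedup options).map (fun k => (k, some (0 : Int))) := by
  have hkeys : (options.foldl (fun d k => d.insert k (some (0 : Int))) PySem.Dict.empty).keys
      = PySem.List.dedup options := by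
    rw [PySem.Dict.keys_foldl_insert]
    simp [PySem.Dict.keys_empty, PySem.List.dedup_eq_ofList, PySem.Set.update, PySem.Set.ofList]
  have hnd : (options.foldl (fun d k => d.insert k (some (0 : Int))) PySem.Dict.empty).keys.Nodup :=
    PySem.Dict.nodup_keys_foldl_insert _ _ _ (by simp [PySem.Dict.keys_empty])
  rw [PySem.Dict.items_eq_map_keys _ hnd (some 0), hkeys]
  exact List.map_congr_left (fun k _ => by
    simp [fromkeys_getD options PySem.Dict.empty (by simp [PySem.Dict.getD_empty])])

-- the invariant of A's counting loop: over keys K, every value is some (running count)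
theorem loopA_items (l : List String) (K : List String) (hK : K.Nodup) (g : String → Int)
    (hl : ∀ s ∈ l, s ∈ K) (d : PySem.Dict String (Option Int))
    (hd : d.items = K.map (fun k => (k, some (g k)))) :
    (l.foldl (fun d s => d.insert s (Option.map (· + 1) (d.getD s none))) d).items
      = K.map (fun k => (k, some (g k + l.count k))) := by
  induction l generalizing d g with
  | nil => simp [hd]
  | cons x l ih =>
      have hxK : x ∈ K := hl x (by simp)
      have hkeysd : d.keys = K := by
        simp [PySem.Dict.keys, hd, List.map_map, Function.comp_def]
      have hnd : d.keys.Nodup := by rw [hkeysd]; exact hK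
      have hmem : (x, some (g x)) ∈ d.items := by
        rw [hd]; exact List.mem_map_of_mem hxK
      have hget : d.getD x none = some (g x) :=
        PySem.Dict.getD_of_mem_items d hmem hnd none
      have hcont : d.contains x = true := by
        rw [PySem.Dict.contains_eq_decide_mem_keys, hkeysd]; simpa using hxK
      simp only [List.foldl_cons, hget, Option.map_some]
      rw [ih (fun k => if k = x then g x + 1 else g k) (fun s hs => hl s (by simp [hs]))]
      · refine List.map_congr_left (fun k _ => ?_)
        by_cases hkx : k = x
        · subst hkx
          simp
          ring
        · simp [hkx, Ne.symm hkx]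
      · rw [PySem.Dict.items_insert_of_contains d _ hcont, hd, List.map_map]
        refine List.map_congr_left (fun k _ => ?_)
        by_cases hkx : k = x <;> simp [hkx]

-- B's per-option projection equals A's per-key running count over the filtered flat list
theorem proj_count (flat : List String) (k : String) :
    (if k ≠ "" then (PySem.List.count flat k : Int) else 0)
      = (0 : Int) + ((flat.filter (fun s => s ≠ "")).count k : Int) := by
  by_cases hk : k = ""
  · subst hk
    rw [if_neg (by simp)]
    have h0 : (flat.filter (fun s => s ≠ "")).count "" = 0 :=
      List.count_eq_zero.mpr (by simp)
    rw [h0]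
    simp
  · rw [if_pos hk, PySem.List.count_eq]
    rw [List.count_filter (by simpa using hk)]
    simp

-- two distinct members of a duplicate-free list force length ≥ 2
theorem two_le_length_of_nodup {α : Type} {l : List α} {a b : α} (hnd : l.Nodup)
    (ha : a ∈ l) (hb : b ∈ l) (hab : a ≠ b) : 2 ≤ l.length := by
  match l with
  | [] => cases ha
  | [x] =>
      simp only [List.mem_singleton] at ha hb
      exact absurd (ha.trans hb.symm) hab
  | x :: y :: t => simp

-- a dict built from a nonempty association list has a nonempty items list
theorem items_ofList_nil {κ ν : Type} [BEq κ] [LawfulBEq κ] (l : List (κ × ν))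
    (h : (PySem.Dict.ofList l).items = []) : l = [] := by
  cases l with
  | nil => rfl
  | cons p t =>
      exfalso
      have hof : PySem.Dict.ofList (p :: t) = (p :: t).foldl (fun d q => d.insert q.1 q.2) PySem.Dict.empty := rfl
      have hk : (PySem.Dict.ofList (p :: t)).keys
          = PySem.Set.update (PySem.Dict.empty : PySem.Dict κ ν).keys ((p :: t).map (fun q => q.1)) := by
        rw [hof]
        exact PySem.Dict.keys_foldl_insert_key (p :: t) (fun q => q.1) (fun _ q => q.2) PySem.Dict.empty
      have hknil : (PySem.Dict.ofList (p :: t)).keys = [] := by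
        simp [PySem.Dict.keys, h]
      rw [hknil] at hk
      have hmem : p.1 ∈ PySem.Set.update (PySem.Dict.empty : PySem.Dict κ ν).keys ((p :: t).map (fun q => q.1)) := by
        have hu : PySem.Set.update (PySem.Dict.empty : PySem.Dict κ ν).keys ((p :: t).map (fun q => q.1))
            = PySem.Set.ofList ((p :: t).map (fun q => q.1)) := rfl
        rw [hu, PySem.Set.mem_ofList]
        simp
      rw [← hk] at hmem
      cases hmem

-- under Pre_ ∧ ¬ D_ every truthy subject of data is one of the options
theorem no_stray_of_pre_not_d (data : List (List String)) (options : List String)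
    (hPre : Pre_get_subject_count data options) (hND : ¬ D_get_subject_count data options) :
    ∀ row ∈ data, ∀ s ∈ row, s ≠ "" → s ∈ options := by
  intro row hrow s hs hne
  by_contra hnot
  have hS : ∃ row ∈ data, ∃ s ∈ row, s ≠ "" ∧ s ∉ options := ⟨row, hrow, s, hs, hne, hnot⟩
  unfold Pre_get_subject_count at hPre
  unfold D_get_subject_count at hND
  push_neg at hPre hND
  exact absurd (hPre hS) (by simpa using hND hS)

-- ===== VERDICT (by name: the statement is the Claim_ definition above) =====
theorem get_subject_count_spec : Claim_unchanged_get_subject_count := by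
  intro data options _ hPre
  intro hND
  have hstray := no_stray_of_pre_not_d data options hPre hND
  unfold get_subject_count get_subject_count_alt
  have hmemoccs : ∀ s ∈ data.flatten.filter (fun s => s ≠ ""), s ∈ PySem.List.dedup options := by
    intro s hs
    rw [List.mem_filter] at hs
    obtain ⟨hsf, hne⟩ := hs
    obtain ⟨row, hrow, hsrow⟩ := List.mem_flatten.mp hsf
    exact (PySem.List.mem_dedup options s).mpr (hstray row hrow s hsrow (by simpa using hne))
  have hA : (data.foldl (fun d row =>
        row.foldl (fun d subject =>
          if subject ≠ "" then d.insert subject (Option.map (· + 1) (d.getD subject none))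
          else d) d)
        (options.foldl (fun d k => d.insert k (some 0)) PySem.Dict.empty)).items
      = (PySem.List.dedup options).map
          (fun k => (k, some ((0 : Int) + (data.flatten.filter (fun s => s ≠ "")).count k))) := by
    rw [nested_loop_eq]
    exact loopA_items _ _ (PySem.List.nodup_dedup options) (fun _ => 0) hmemoccs _
      (fromkeys_items options)
  have hB : (PySem.List.dedup options).map
        (fun k => (k, some (if k ≠ "" then (PySem.List.count data.flatten k : Int) else 0)))
      = (PySem.List.dedup options).map
          (fun k => (k, some ((0 : Int) + (data.flatten.filter (fun s => s ≠ "")).count k))) :=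
    List.map_congr_left (fun k _ => by rw [proj_count])
  simp only [hA, hB]

theorem get_subject_count_changed : Claim_changed_get_subject_count := by
  unfold Claim_changed_get_subject_count; decide

theorem get_subject_count_tight : Claim_exact_get_subject_count := by
  intro data options _ _ hD
  obtain ⟨⟨row, hrow, s, hs, hne, hnot⟩, hlen⟩ := hD
  have hsf : s ∈ data.flatten.filter (fun s => s ≠ "") := by
    rw [List.mem_filter]
    exact ⟨List.mem_flatten.mpr ⟨row, hrow, hs⟩, by simp [hne]⟩
  have hsded : s ∈ PySem.List.dedup (options ++ data.flatten.filter (fun s => s ≠ "")) := by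
    rw [PySem.List.mem_dedup, List.mem_append]
    exact Or.inr hsf
  -- options must be empty: a key from options and the stray key would make two keys
  have hopt : options = [] := by
    cases options with
    | nil => rfl
    | cons o rest =>
        exfalso
        have ho : o ∈ PySem.List.dedup ((o :: rest) ++ data.flatten.filter (fun s => s ≠ "")) := by
          rw [PySem.List.mem_dedup]; simp
        have hso : s ≠ o := fun h => hnot (h ▸ List.mem_cons_self)
        have h2 : (2 : Nat) ≤ (PySem.List.dedup ((o :: rest) ++ data.flatten.filter (fun s => s ≠ ""))).length :=
          two_le_length_of_nodup
            (PySem.List.nodup_dedup ((o :: rest) ++ data.flatten.filter (fun s => s ≠ ""))) hsded ho hso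
        omega
  subst hopt
  -- B returns the empty dict
  have hBnil : get_subject_count_alt data [] = [] := rfl
  -- A's dict keeps the stray key, so A's result is nonempty
  intro hAB
  rw [hBnil] at hAB
  have hAitems : (data.foldl (fun d row =>
        row.foldl (fun d subject =>
          if subject ≠ "" then d.insert subject (Option.map (· + 1) (d.getD subject none))
          else d) d)
        (([] : List String).foldl (fun d k => d.insert k (some 0))
          (PySem.Dict.empty : PySem.Dict String (Option Int)))).items ≠ [] := by
    intro hnil
    have hkeys : (data.foldl (fun d row =>
        row.foldl (fun d subject =>
          if subject ≠ "" then d.insert subject (Option.map (· + 1) (d.getD subject none))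
          else d) d)
        (([] : List String).foldl (fun d k => d.insert k (some 0))
          (PySem.Dict.empty : PySem.Dict String (Option Int)))).keys
        = PySem.Set.ofList (data.flatten.filter (fun s => s ≠ "")) := by
      rw [nested_loop_eq, PySem.Dict.keys_foldl_insert]
      rfl
    have hmem' : s ∈ PySem.Set.ofList (data.flatten.filter (fun s => s ≠ "")) :=
      (PySem.Set.mem_ofList _ _).mpr hsf
    rw [← hkeys, PySem.Dict.keys, hnil] at hmem'
    cases hmem'
  have hA_eq : get_subject_count data []
      = (PySem.Dict.ofList (PySem.List.sorted (data.foldl (fun d row =>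
          row.foldl (fun d subject =>
            if subject ≠ "" then d.insert subject (Option.map (· + 1) (d.getD subject none))
            else d) d)
          (([] : List String).foldl (fun d k => d.insert k (some 0)) PySem.Dict.empty)).items
          (fun x => x.2.getD 0) true)).items := rfl
  rw [hA_eq] at hAB
  have hLnil := items_ofList_nil _ hAB
  have hlen1 := congrArg List.length hLnil
  rw [PySem.List.length_sorted, List.length_nil] at hlen1
  exact hAitems (List.eq_nil_of_length_eq_zero hlen1)

@[simp] theorem get_subject_count_raises : Claim_raises_get_subject_count := by
  unfold Claim_raises_get_subject_count
  constructor
  · intro data options _ hR hPre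
    exact hPre hR
  · refine ⟨by decide, ⟨?_, by decide⟩, by decide⟩
    exact ⟨["kj", "kj"], by decide, "kj", by decide, by decide, by decide⟩
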